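-- pv_equiv track=rewrite | github.com/ImtaeZ/Chula-Course | ComProg/ข้อสอบเก่า/Grader3_2566-2/friend.py | count_friends
-- ===== SOURCE A (Python) =====
-- def count_friends(data, names):
--     info = {}
--     for cp in data:
--         name,friend = cp
--         if name not in info:
--             info[name] = {friend,}
--         else:
--             info[name].add(friend)
--         if friend not in info:
--             info[friend] = {name,}
--         else:
--             info[friend].add(name)
--     ans = []
--     for n in sorted(names):
--         if n in info:
--             ans.append((n, len(info[n])))
--         else:
--             ans.append((n, 0))
--     return ans
-- ===== SOURCE B (Python) =====
-- def count_friends(data, names):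
--     def degree(n):
--         nbrs = [b for a, b in data if a == n] + [a for a, b in data if b == n]
--         return sum(1 for i, x in enumerate(nbrs) if x not in nbrs[:i])
--     return [(n, degree(n)) for n in sorted(names)]
-- ===== Notes on version B (the rewrite author's own statement) =====
-- stated objective: simpler
-- what changed: B removes A's global dict of incrementally-built per-node friend sets: for each name in sorted(names) it rescans data, builds that name's neighbour list by two comprehensions and counts distinct friends by first-occurrence counting (x not in nbrs[:i]) - no dict, no set, repeated scans instead of one index.
import Mathlib
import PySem

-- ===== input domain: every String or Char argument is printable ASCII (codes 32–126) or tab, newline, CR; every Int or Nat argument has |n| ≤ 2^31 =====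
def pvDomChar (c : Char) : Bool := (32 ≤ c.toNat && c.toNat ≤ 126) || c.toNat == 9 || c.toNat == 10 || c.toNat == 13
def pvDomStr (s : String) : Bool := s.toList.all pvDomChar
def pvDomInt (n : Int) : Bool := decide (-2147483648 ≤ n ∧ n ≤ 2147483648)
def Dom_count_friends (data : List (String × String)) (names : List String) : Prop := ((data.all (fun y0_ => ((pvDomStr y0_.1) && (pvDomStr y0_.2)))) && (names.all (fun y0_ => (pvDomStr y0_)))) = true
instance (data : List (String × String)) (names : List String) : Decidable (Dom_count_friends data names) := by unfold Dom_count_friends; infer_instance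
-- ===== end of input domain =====

-- B drops A's global dict of per-node friend sets entirely: for each queried name it rescans
-- data, builds that name's neighbour list and counts first occurrences (simpler, but not faster).


-- ===== PORT A =====
def count_friends (data : List (String × String)) (names : List String) : List (String × Int) :=
  let info : PySem.Dict String (PySem.Set String) := data.foldl (fun info cp =>
    let name := cp.1
    let friend := cp.2
    let info1 := if !info.contains name then info.insert name (PySem.Set.ofList [friend])
      else info.modify name PySem.Set.empty (fun s => PySem.Set.add s friend)
    if !info1.contains friend then info1.insert friend (PySem.Set.ofList [name])
      else info1.modify friend PySem.Set.empty (fun s => PySem.Set.add s name)) PySem.Dict.empty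
  (PySem.List.sorted names (fun x => x) false).foldl (fun ans n =>
    if info.contains n then ans ++ [(n, ((info.getD n PySem.Set.empty).length : Int))]
    else ans ++ [(n, (0 : Int))]) []

-- ===== PORT B =====
/-- Source B's local `nbrs`: the two comprehensions concatenated. -/
def pvNbrs (data : List (String × String)) (n : String) : List String :=
  (data.filter (fun p => p.1 == n)).map Prod.snd ++ (data.filter (fun p => p.2 == n)).map Prod.fst

/-- Source B's `degree`: sum(1 for i, x in enumerate(nbrs) if x not in nbrs[:i]). -/
def pvDegree (data : List (String × String)) (n : String) : Int :=
  let nbrs := pvNbrs data n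
  (PySem.List.enumerate nbrs 0).foldl (fun c ix =>
    if !((PySem.List.slice nbrs none (some ix.1)).contains ix.2) then c + 1 else c) 0

def count_friends_alt (data : List (String × String)) (names : List String) : List (String × Int) :=
  (PySem.List.sorted names (fun x => x) false).map (fun n => (n, pvDegree data n))

-- ===== PRECONDITION & SPEC =====
def Spec_count_friends (data : List (String × String)) (names : List String) (out : List (String × Int)) : Prop := out = count_friends_alt data names
instance (data : List (String × String)) (names : List String) (out : List (String × Int)) : Decidable (Spec_count_friends data names out) := by unfold Spec_count_friends; infer_instance

-- ===== CLAIM (what is proved, stated in full; the proofs are below) =====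
def Claim_equal_count_friends : Prop := ∀ (data : List (String × String)) (names : List String), Dom_count_friends data names → Spec_count_friends data names (count_friends data names)

-- ===== LEMMAS AND PROOFS =====

/-- Directed destinations out of `n` recorded in the edge list `E`. -/
def pvFilt (E : List (String × String)) (n : String) : List String :=
  (E.filter (fun e => e.1 == n)).map Prod.snd

/-- Invariant relating A's dict-of-sets to a flat directed-edge set. -/
def pvInv (info : PySem.Dict String (PySem.Set String)) (E : List (String × String)) : Prop :=
  ∀ n, info.getD n PySem.Set.empty = pvFilt E n

/-- A's dict-building loop (proof abbreviation; definitionally the fold inside `count_friends`). -/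
def pvInfoOf (data : List (String × String)) : PySem.Dict String (PySem.Set String) :=
  data.foldl (fun info cp =>
    let name := cp.1
    let friend := cp.2
    let info1 := if !info.contains name then info.insert name (PySem.Set.ofList [friend])
      else info.modify name PySem.Set.empty (fun s => PySem.Set.add s friend)
    if !info1.contains friend then info1.insert friend (PySem.Set.ofList [name])
      else info1.modify friend PySem.Set.empty (fun s => PySem.Set.add s name)) PySem.Dict.empty

/-- The deduplicated directed-edge set of `data` (proof device for A's side only). -/
def pvEdgesOf (data : List (String × String)) : PySem.Set (String × String) :=
  data.foldl (fun s cp => PySem.Set.add (PySem.Set.add s (cp.1, cp.2)) (cp.2, cp.1)) PySem.Set.empty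

lemma mem_pvFilt {E : List (String × String)} {a b : String} :
    b ∈ pvFilt E a ↔ (a, b) ∈ E := by
  simp only [pvFilt, List.mem_map, List.mem_filter]
  constructor
  · rintro ⟨⟨x, y⟩, ⟨hm, he⟩, rfl⟩
    simp only [beq_iff_eq] at he; simpa [he] using hm
  · intro h; exact ⟨(a, b), ⟨h, by simp⟩, rfl⟩

lemma pvFilt_append_single (E : List (String × String)) (a b n : String) :
    pvFilt (E ++ [(a, b)]) n = pvFilt E n ++ (if a = n then [b] else []) := by
  by_cases h : a = n <;> simp [pvFilt, List.filter_append, h]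

lemma pvSet_add_eq (E : List (String × String)) (a b : String) :
    PySem.Set.add E (a, b) = if (a, b) ∈ E then E else E ++ [(a, b)] := by
  simp [PySem.Set.add, PySem.Set.contains]

lemma pvInv_upd {info : PySem.Dict String (PySem.Set String)} {E : List (String × String)}
    (a b : String) (h : pvInv info E) :
    pvInv (if !info.contains a then info.insert a (PySem.Set.ofList [b])
           else info.modify a PySem.Set.empty (fun s => PySem.Set.add s b))
          (PySem.Set.add E (a, b)) := by
  intro n
  rw [pvSet_add_eq]
  by_cases hc : info.contains a
  · simp only [hc, Bool.not_true, Bool.false_eq_true, if_false]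
    rw [PySem.Dict.getD_modify]
    by_cases hn : n = a
    · subst hn
      rw [if_pos rfl, h n]
      by_cases hm : (n, b) ∈ E
      · simp [hm, PySem.Set.add, PySem.Set.contains, mem_pvFilt.2 hm]
      · have hb : b ∉ pvFilt E n := fun hx => hm (mem_pvFilt.1 hx)
        simp [hm, PySem.Set.add, PySem.Set.contains, hb, pvFilt_append_single]
    · rw [if_neg hn, h n]
      by_cases hm : (a, b) ∈ E
      · simp [hm]
      · have hna : a ≠ n := fun h' => hn h'.symm
        simp [hm, pvFilt_append_single, hna]
  · have hget : info.getD a PySem.Set.empty = PySem.Set.empty :=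
      PySem.Dict.getD_of_not_contains info PySem.Set.empty (by simpa using hc)
    have hfa : pvFilt E a = [] := by
      have := h a; rw [hget] at this; exact this.symm
    have hm : (a, b) ∉ E := fun hx => by
      have := mem_pvFilt.2 hx; rw [hfa] at this; exact (List.not_mem_nil).elim this
    simp only [hc, Bool.not_false, if_true]
    rw [PySem.Dict.getD_insert, if_neg hm]
    by_cases hn : n = a
    · subst hn
      simp [pvFilt_append_single, hfa, PySem.Set.ofList, PySem.Set.add, PySem.Set.empty]
    · have hna : a ≠ n := fun h' => hn h'.symm
      rw [if_neg hn, h n, pvFilt_append_single, if_neg hna, List.append_nil]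

lemma pvInv_fold (data : List (String × String)) :
    ∀ (info : PySem.Dict String (PySem.Set String)) (E : List (String × String)),
    pvInv info E →
    pvInv (data.foldl (fun info cp =>
        let name := cp.1
        let friend := cp.2
        let info1 := if !info.contains name then info.insert name (PySem.Set.ofList [friend])
          else info.modify name PySem.Set.empty (fun s => PySem.Set.add s friend)
        if !info1.contains friend then info1.insert friend (PySem.Set.ofList [name])
          else info1.modify friend PySem.Set.empty (fun s => PySem.Set.add s name)) info)
      (data.foldl (fun s cp => PySem.Set.add (PySem.Set.add s (cp.1, cp.2)) (cp.2, cp.1)) E) := by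
  induction data with
  | nil => intro info E h; exact h
  | cons cp rest ih =>
    intro info E h
    simp only [List.foldl_cons]
    exact ih _ _ (pvInv_upd cp.2 cp.1 (pvInv_upd cp.1 cp.2 h))

lemma pvPointwise (info : PySem.Dict String (PySem.Set String)) (E : List (String × String))
    (h : pvInv info E) (n : String) :
    (if info.contains n then ((info.getD n PySem.Set.empty).length : Int) else 0)
      = ((pvFilt E n).length : Int) := by
  by_cases hc : info.contains n
  · rw [if_pos hc, h n]
  · have hget : info.getD n PySem.Set.empty = PySem.Set.empty :=
      PySem.Dict.getD_of_not_contains info PySem.Set.empty (by simpa using hc)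
    have hfa : pvFilt E n = [] := by
      have := h n; rw [hget] at this; exact this.symm
    simp [hc, hfa]

lemma pvEdges_nodup_aux (data : List (String × String)) :
    ∀ s : List (String × String), s.Nodup →
      (data.foldl (fun s cp => PySem.Set.add (PySem.Set.add s (cp.1, cp.2)) (cp.2, cp.1)) s).Nodup := by
  induction data with
  | nil => intro s h; exact h
  | cons cp rest ih =>
    intro s h
    simp only [List.foldl_cons]
    exact ih _ (PySem.Set.nodup_add _ _ (PySem.Set.nodup_add _ _ h))

lemma mem_pvEdges_aux (data : List (String × String)) :
    ∀ (s : List (String × String)) (p : String × String),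
      p ∈ data.foldl (fun s cp => PySem.Set.add (PySem.Set.add s (cp.1, cp.2)) (cp.2, cp.1)) s ↔
        p ∈ s ∨ p ∈ data ∨ (p.2, p.1) ∈ data := by
  induction data with
  | nil => intro s p; simp
  | cons cp rest ih =>
    intro s p
    simp only [List.foldl_cons, ih, PySem.Set.mem_add, List.mem_cons]
    constructor
    · rintro (((h | h) | h) | h | h) <;> simp_all [Prod.ext_iff]
    · rintro (h | (h | h) | (h | h)) <;> simp_all [Prod.ext_iff]

lemma mem_pvNbrs (data : List (String × String)) (n x : String) :
    x ∈ pvNbrs data n ↔ (n, x) ∈ data ∨ (x, n) ∈ data := by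
  simp only [pvNbrs, List.mem_append, List.mem_map, List.mem_filter, beq_iff_eq]
  constructor
  · rintro (⟨⟨a, b⟩, ⟨hm, he⟩, rfl⟩ | ⟨⟨a, b⟩, ⟨hm, he⟩, rfl⟩)
    · subst he; exact Or.inl hm
    · subst he; exact Or.inr hm
  · rintro (h | h)
    · exact Or.inl ⟨(n, x), ⟨h, rfl⟩, rfl⟩
    · exact Or.inr ⟨(x, n), ⟨h, rfl⟩, rfl⟩

lemma pvFilt_nodup (E : List (String × String)) (hE : E.Nodup) (n : String) :
    (pvFilt E n).Nodup := by
  refine List.Nodup.map_on ?_ (hE.filter _)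
  rintro ⟨a, b⟩ ha ⟨c, d⟩ hc he
  simp only [List.mem_filter, beq_iff_eq] at ha hc
  cases he
  rw [ha.2, hc.2]

/-- First-occurrence counting over `enumerate` computes the number of distinct elements. -/
lemma pvCountFirst (l : List String) :
    (PySem.List.enumerate l 0).foldl (fun c ix =>
      if !((PySem.List.slice l none (some ix.1)).contains ix.2) then c + 1 else c) (0 : Int)
      = (l.toFinset.card : Int) := by
  induction l using List.reverseRecOn with
  | nil => simp [PySem.List.enumerate]
  | append_singleton t x ih =>
    rw [PySem.List.enumerate_append, List.foldl_append]
    have hcongr :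
        (PySem.List.enumerate t 0).foldl (fun c ix =>
          if !((PySem.List.slice (t ++ [x]) none (some ix.1)).contains ix.2) then c + 1 else c) (0 : Int)
        = (PySem.List.enumerate t 0).foldl (fun c ix =>
          if !((PySem.List.slice t none (some ix.1)).contains ix.2) then c + 1 else c) (0 : Int) := by
      apply PySem.List.foldl_congr_mem
      intro c ix hix
      rcases (PySem.List.mem_enumerate_iff _ _ _).1 hix with ⟨k, hk, rfl⟩
      have h1 : PySem.List.slice (t ++ [x]) none (some ((0 : Int) + k)) = (t ++ [x]).take k := by
        rw [PySem.List.slice_to _ (by positivity)]; norm_num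
      have h2 : PySem.List.slice t none (some ((0 : Int) + k)) = t.take k := by
        rw [PySem.List.slice_to _ (by positivity)]; norm_num
      rw [h1, h2, List.take_append_of_le_length (le_of_lt hk)]
    rw [hcongr, ih]
    simp only [PySem.List.enumerate_cons, PySem.List.enumerate_nil, List.foldl_cons, List.foldl_nil]
    have hlast : PySem.List.slice (t ++ [x]) none (some ((0 : Int) + t.length)) = t := by
      rw [PySem.List.slice_to _ (by positivity)]
      norm_num
    rw [hlast]
    by_cases hx : x ∈ t
    · have : (t ++ [x]).toFinset = t.toFinset := by
        ext y; simp only [List.mem_toFinset, List.mem_append, List.mem_singleton]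
        exact ⟨fun h => h.elim id (fun h' => h' ▸ hx), Or.inl⟩
      simp [hx, this]
    · have : (t ++ [x]).toFinset = insert x t.toFinset := by
        ext y; simp
      rw [this, Finset.card_insert_of_notMem (by simpa using hx)]
      simp [hx]

lemma pvDegree_eq (data : List (String × String)) (n : String) :
    pvDegree data n = ((pvFilt (pvEdgesOf data) n).length : Int) := by
  have hnodup : (pvFilt (pvEdgesOf data) n).Nodup :=
    pvFilt_nodup _ (pvEdges_nodup_aux data [] List.nodup_nil) n
  have hfin : (pvNbrs data n).toFinset = (pvFilt (pvEdgesOf data) n).toFinset := by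
    ext x
    rw [List.mem_toFinset, List.mem_toFinset, mem_pvNbrs, mem_pvFilt]
    unfold pvEdgesOf
    rw [mem_pvEdges_aux]
    simp
  rw [pvDegree, pvCountFirst, hfin, List.toFinset_card_of_nodup hnodup]

-- ===== VERDICT (by name: the statement is the Claim_ definition above) =====
theorem count_friends_spec : Claim_equal_count_friends := by
  intro data names _hdom
  show (PySem.List.sorted names (fun x => x) false).foldl (fun ans n =>
      if (pvInfoOf data).contains n then
        ans ++ [(n, (((pvInfoOf data).getD n PySem.Set.empty).length : Int))]
      else ans ++ [(n, (0 : Int))]) []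
    = (PySem.List.sorted names (fun x => x) false).map (fun n => (n, pvDegree data n))
  have hinv : pvInv (pvInfoOf data) (pvEdgesOf data) := by
    apply pvInv_fold
    intro n
    simp [pvFilt, PySem.Dict.getD_empty, PySem.Set.empty]
  have hstep : ∀ (acc : List (String × Int)) (n : String), n ∈ PySem.List.sorted names (fun x => x) false →
      (if (pvInfoOf data).contains n then
        acc ++ [(n, (((pvInfoOf data).getD n PySem.Set.empty).length : Int))]
       else acc ++ [(n, (0 : Int))])
      = acc ++ [(n, if (pvInfoOf data).contains n then
          (((pvInfoOf data).getD n PySem.Set.empty).length : Int) else 0)] := by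
    intro acc n _
    by_cases hc : (pvInfoOf data).contains n <;> simp [hc]
  rw [PySem.List.foldl_congr_mem
        (f := fun ans n =>
          if (pvInfoOf data).contains n then
            ans ++ [(n, (((pvInfoOf data).getD n PySem.Set.empty).length : Int))]
          else ans ++ [(n, (0 : Int))])
        (g := fun ans n => ans ++ [(n, if (pvInfoOf data).contains n then
            (((pvInfoOf data).getD n PySem.Set.empty).length : Int) else 0)])
        (l := PySem.List.sorted names (fun x => x) false)
        (init := ([] : List (String × Int))) hstep,
      PySem.List.foldl_append_singleton_eq_map, List.nil_append]
  apply List.map_congr_left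
  intro n _
  rw [pvDegree_eq]
  exact congrArg (Prod.mk n) (pvPointwise (pvInfoOf data) (pvEdgesOf data) hinv n)
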